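-- pv_equiv track=rewrite | github.com/Surodoeth/RoverOlympics | RoverOlympics.py | get_rover_path
-- ===== SOURCE A (Python) =====
-- def get_movement(direction):
--
--     direction_vectors = {
--         "N": [0, 1],
--         "S": [0, -1],
--         "E": [1, 0],
--         "W": [-1, 0]
--     }
--     return direction_vectors[direction]
--
-- def get_rover_path(start, instructions):
--
--     path = [start]
--     pos_x = start[0]
--     pos_y = start[1]
--     movements = []
--     for n in instructions:
--         m = get_movement(n)
--         movements.append(m)
--         pos_x = pos_x + m[0]
--         pos_y = pos_y + m[1]
--         path.append([pos_x, pos_y])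
--
--     return movements, path
-- ===== SOURCE B (Python) =====
-- _VECTORS = {"N": [0, 1], "S": [0, -1], "E": [1, 0], "W": [-1, 0]}
--
-- def _walk(pos, moves):
--     # recursive prefix-sum scan: path starting at pos following moves
--     if not moves:
--         return [pos]
--     step = [pos[0] + moves[0][0], pos[1] + moves[0][1]]
--     return [pos] + _walk(step, moves[1:])
--
-- def get_rover_path(start, instructions):
--     movements = [list(_VECTORS[c]) for c in instructions]
--     return movements, _walk(start, movements)
-- ===== Notes on version B (the rewrite author's own statement) =====
-- stated objective: alternative
-- what changed: Two separate phases instead of one fused coordinate-tracking loop: movements is built by a single map over the instructions, and the path is produced by a recursive prefix-sum scan over the movements list rather than by mutating pos_x/pos_y accumulators.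
import Mathlib
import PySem

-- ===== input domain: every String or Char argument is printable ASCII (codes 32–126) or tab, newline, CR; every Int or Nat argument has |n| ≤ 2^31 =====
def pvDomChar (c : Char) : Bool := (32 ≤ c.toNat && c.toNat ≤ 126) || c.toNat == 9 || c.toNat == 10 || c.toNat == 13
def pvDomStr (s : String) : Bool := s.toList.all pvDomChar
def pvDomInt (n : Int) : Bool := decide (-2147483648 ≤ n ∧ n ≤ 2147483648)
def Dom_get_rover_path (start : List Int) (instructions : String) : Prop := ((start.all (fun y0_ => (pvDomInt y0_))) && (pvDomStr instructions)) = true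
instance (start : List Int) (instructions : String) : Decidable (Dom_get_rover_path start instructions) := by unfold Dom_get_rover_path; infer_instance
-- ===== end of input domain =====

-- B differs from A by decomposition only: movements by a map, path by a recursive prefix-sum scan.

-- ===== PORT A =====
-- dict lookup of A's get_movement; none = KeyError (excluded by Pre_)
def get_movement (direction : Char) : Option (List Int) :=
  List.lookup direction [('N', [0, 1]), ('S', [0, -1]), ('E', [1, 0]), ('W', [-1, 0])]

-- A: single loop carrying (movements, pos_x, pos_y, path); .getD defaults are unreachable under Pre_
def get_rover_path (start : List Int) (instructions : String) : List (List Int) × List (List Int) :=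
  let path : List (List Int) := [start]
  let pos_x : Int := (PySem.List.pyGet? start 0).getD 0
  let pos_y : Int := (PySem.List.pyGet? start 1).getD 0
  let st := instructions.toList.foldl
    (fun (st : List (List Int) × Int × Int × List (List Int)) n =>
      let m := (get_movement n).getD [0, 0]
      let movements := st.1 ++ [m]
      let pos_x := st.2.1 + (PySem.List.pyGet? m 0).getD 0
      let pos_y := st.2.2.1 + (PySem.List.pyGet? m 1).getD 0
      (movements, pos_x, pos_y, st.2.2.2 ++ [[pos_x, pos_y]]))
    ([], pos_x, pos_y, path)
  (st.1, st.2.2.2)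

-- ===== PORT B =====
def pvVectors : List (Char × List Int) := [('N', [0, 1]), ('S', [0, -1]), ('E', [1, 0]), ('W', [-1, 0])]

-- recursive prefix-sum scan (B's _walk)
def pvWalk (pos : List Int) (moves : List (List Int)) : List (List Int) :=
  match moves with
  | [] => [pos]
  | m :: rest =>
      let step := [(PySem.List.pyGet? pos 0).getD 0 + (PySem.List.pyGet? m 0).getD 0,
                   (PySem.List.pyGet? pos 1).getD 0 + (PySem.List.pyGet? m 1).getD 0]
      pos :: pvWalk step rest

def get_rover_path_alt (start : List Int) (instructions : String) : List (List Int) × List (List Int) :=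
  let movements := instructions.toList.map (fun c => (List.lookup c pvVectors).getD [0, 0])
  (movements, pvWalk start movements)

-- ===== PRECONDITION & SPEC =====
-- Pre_ excludes exactly the inputs where A raises: start with fewer than 2 elements (IndexError on start[1]) and instruction characters outside NSEW (KeyError in get_movement).
def Pre_get_rover_path (start : List Int) (instructions : String) : Prop :=
  2 ≤ start.length ∧ (instructions.toList.all (fun c => c == 'N' || c == 'S' || c == 'E' || c == 'W')) = true
instance (start : List Int) (instructions : String) : Decidable (Pre_get_rover_path start instructions) := by
  unfold Pre_get_rover_path; infer_instance

def pvWitness_get_rover_path : List Int × String := ([0, 1], "NE")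

def Spec_get_rover_path (start : List Int) (instructions : String) (out : List (List Int) × List (List Int)) : Prop := out = get_rover_path_alt start instructions
instance (start : List Int) (instructions : String) (out : List (List Int) × List (List Int)) : Decidable (Spec_get_rover_path start instructions out) := by unfold Spec_get_rover_path; infer_instance

-- ===== CLAIM (what is proved, stated in full; the proofs are below) =====
def Claim_equal_get_rover_path : Prop := ∀ (start : List Int) (instructions : String), Dom_get_rover_path start instructions → Pre_get_rover_path start instructions → Spec_get_rover_path start instructions (get_rover_path start instructions)

-- ===== LEMMAS AND PROOFS =====

-- the body of A's loop, named for the proofs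
def pvStepA (st : List (List Int) × Int × Int × List (List Int)) (n : Char) :
    List (List Int) × Int × Int × List (List Int) :=
  let m := (get_movement n).getD [0, 0]
  let movements := st.1 ++ [m]
  let pos_x := st.2.1 + (PySem.List.pyGet? m 0).getD 0
  let pos_y := st.2.2.1 + (PySem.List.pyGet? m 1).getD 0
  (movements, pos_x, pos_y, st.2.2.2 ++ [[pos_x, pos_y]])

lemma pvWalk_cons_head (pos : List Int) (ms : List (List Int)) :
    pvWalk pos ms = pos :: (pvWalk pos ms).tail := by
  cases ms <;> simp [pvWalk]

lemma pvWalk_pair (x y : Int) (m : List Int) (rest : List (List Int)) :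
    pvWalk [x, y] (m :: rest) =
      [x, y] :: pvWalk [x + (PySem.List.pyGet? m 0).getD 0, y + (PySem.List.pyGet? m 1).getD 0] rest := by
  simp [pvWalk, PySem.List.pyGet?, PySem.List.pyIdx?]

-- loop invariant: A's fold over valid chars appends map-vectors to movements and the scan tail to path
lemma foldA_invariant (cs : List Char)
    (hcs : ∀ c ∈ cs, c = 'N' ∨ c = 'S' ∨ c = 'E' ∨ c = 'W') :
    ∀ (mv acc : List (List Int)) (x y : Int),
    cs.foldl pvStepA (mv, x, y, acc) =
      (mv ++ cs.map (fun c => (List.lookup c pvVectors).getD [0, 0]),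
       ((cs.foldl pvStepA (mv, x, y, acc)).2.1, (cs.foldl pvStepA (mv, x, y, acc)).2.2.1,
        acc ++ (pvWalk [x, y] (cs.map (fun c => (List.lookup c pvVectors).getD [0, 0]))).tail)) := by
  induction cs with
  | nil => intro mv acc x y; simp [pvWalk]
  | cons c cs ih =>
      intro mv acc x y
      have hc := hcs c (List.mem_cons_self ..)
      have hrest : ∀ c ∈ cs, c = 'N' ∨ c = 'S' ∨ c = 'E' ∨ c = 'W' :=
        fun c hm => hcs c (List.mem_cons_of_mem _ hm)
      have hm : (get_movement c).getD [0, 0] = (List.lookup c pvVectors).getD [0, 0] := by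
        rcases hc with h | h | h | h <;> subst h <;> rfl
      set m := (List.lookup c pvVectors).getD [0, 0] with hmdef
      have hstep : pvStepA (mv, x, y, acc) c =
          (mv ++ [m], x + (PySem.List.pyGet? m 0).getD 0, y + (PySem.List.pyGet? m 1).getD 0,
           acc ++ [[x + (PySem.List.pyGet? m 0).getD 0, y + (PySem.List.pyGet? m 1).getD 0]]) := by
        simp [pvStepA, hm]
      have := ih hrest (mv ++ [m]) (acc ++ [[x + (PySem.List.pyGet? m 0).getD 0, y + (PySem.List.pyGet? m 1).getD 0]])
        (x + (PySem.List.pyGet? m 0).getD 0) (y + (PySem.List.pyGet? m 1).getD 0)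
      simp only [List.foldl_cons, hstep] at *
      rw [this]
      simp only [List.map_cons, pvWalk_pair, List.tail_cons, List.append_assoc,
        List.singleton_append, Prod.mk.injEq, true_and]
      rw [← pvWalk_cons_head, ← hmdef]
      exact ⟨rfl, rfl⟩

-- head of pvWalk from the real start list equals the scan from its first two coordinates
lemma pvWalk_start (start : List Int) (ms : List (List Int)) :
    pvWalk start ms =
      start :: (pvWalk [(PySem.List.pyGet? start 0).getD 0, (PySem.List.pyGet? start 1).getD 0] ms).tail := by
  cases ms with
  | nil => simp [pvWalk]
  | cons m rest =>
      rw [pvWalk_pair]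
      simp only [List.tail_cons]
      conv_lhs => rw [pvWalk]

-- ===== VERDICT (by name: the statement is the Claim_ definition above) =====
theorem get_rover_path_spec : Claim_equal_get_rover_path := by
  intro start instructions _ hpre
  obtain ⟨hlen, hcs⟩ := hpre
  have hcs' : ∀ c ∈ instructions.toList, c = 'N' ∨ c = 'S' ∨ c = 'E' ∨ c = 'W' := by
    intro c hmem
    have := List.all_eq_true.mp hcs c hmem
    simpa [or_assoc] using this
  unfold Spec_get_rover_path get_rover_path get_rover_path_alt
  have hfold := foldA_invariant instructions.toList hcs' [] [start]
    ((PySem.List.pyGet? start 0).getD 0) ((PySem.List.pyGet? start 1).getD 0)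
  simp only [show (fun (st : List (List Int) × Int × Int × List (List Int)) n =>
      let m := (get_movement n).getD [0, 0]
      let movements := st.1 ++ [m]
      let pos_x := st.2.1 + (PySem.List.pyGet? m 0).getD 0
      let pos_y := st.2.2.1 + (PySem.List.pyGet? m 1).getD 0
      (movements, pos_x, pos_y, st.2.2.2 ++ [[pos_x, pos_y]])) = pvStepA from rfl]
  rw [hfold]
  rw [pvWalk_start start]
  simp only [List.nil_append, List.singleton_append]
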